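-- pv_equiv track=rewrite | github.com/gnecula/deanna | motifs.py | split_motifs
-- ===== SOURCE A (Python) =====
-- def split_motifs(labels: str):
--   """Split the labels strings into motifs.
--
--   A motif is a sequence of consecutive letters in "labels",
--   not including "i" or "0".
--
--   Returns:
--     list of pairs, with the motif substring, and the index in labels where
--     it starts.
--   """
--   motifs = []
--   motif_start_index = -1  # The index in labels of the first syllable in the motif
--   for i, label in enumerate(labels):
--     if label == "i" or label == "0":
--       if motif_start_index >= 0:  # we are inside a motif
--         motifs.append((labels[motif_start_index:i], motif_start_index))
--         motif_start_index = -1  # mark that we are not in a motif anymore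
--       else:
--         # we are not in a motif, keep going (multiple consecutive separators)
--         continue
--     else:
--       # a syllable
--       if motif_start_index >= 0:
--         # already inside a motif
--         continue
--       else:
--         # We start a motif
--         motif_start_index = i
--
--   return motifs
-- ===== SOURCE B (Python) =====
-- def split_motifs(labels: str):
--   """Split the labels strings into motifs (see A): run-scanning rewrite.
--
--   Instead of a per-character state machine with a sentinel start index,
--   scan run by run: skip separators, then take the whole maximal run of
--   non-separator characters at once; emit it only if it is terminated by
--   a separator (a run reaching end-of-string is not emitted, as in A).
--   """
--   motifs = []
--   i = 0
--   n = len(labels)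
--   while i < n:
--     if labels[i] in ("i", "0"):
--       i += 1
--     else:
--       j = i
--       while j < n and labels[j] not in ("i", "0"):
--         j += 1
--       if j < n:
--         motifs.append((labels[i:j], i))
--       i = j
--   return motifs
-- ===== Notes on version B (the rewrite author's own statement) =====
-- stated objective: simpler
-- what changed: A's per-character state machine with a -1 sentinel start index is replaced by a run-at-a-time scan: skip separators, grab the whole maximal non-separator run with an inner scan, and emit it only when it is terminated by a separator.
import Mathlib
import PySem

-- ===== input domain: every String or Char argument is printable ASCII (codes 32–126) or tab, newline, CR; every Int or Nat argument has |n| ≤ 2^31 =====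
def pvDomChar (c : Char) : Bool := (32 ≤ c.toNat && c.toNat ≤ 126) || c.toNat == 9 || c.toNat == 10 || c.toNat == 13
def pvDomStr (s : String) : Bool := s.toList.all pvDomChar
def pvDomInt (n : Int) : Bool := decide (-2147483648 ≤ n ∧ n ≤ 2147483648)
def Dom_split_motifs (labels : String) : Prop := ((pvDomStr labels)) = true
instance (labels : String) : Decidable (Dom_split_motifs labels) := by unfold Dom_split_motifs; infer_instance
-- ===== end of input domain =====

-- B replaces A's per-character state machine (sentinel start index) by a run-at-a-time
-- scan (skip separators, take a maximal non-separator run, emit it only when a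
-- separator terminates it); objective: simpler, same O(n) cost.

-- ===== PORT A =====
-- one step of A's loop body: state = (motifs, motif_start_index), item = (i, label)
def aStep (labels : String) (st : List (String × Int) × Int) (p : Int × Char) :
    List (String × Int) × Int :=
  if p.2 = 'i' ∨ p.2 = '0' then
    if st.2 ≥ 0 then
      (st.1 ++ [(PySem.Str.slice labels (some st.2) (some p.1), st.2)], -1)
    else st
  else
    if st.2 ≥ 0 then st else (st.1, p.1)

def split_motifs (labels : String) : List (String × Int) :=
  ((PySem.List.enumerate labels.toList 0).foldl (aStep labels) ([], -1)).1

-- ===== PORT B =====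
def altSep (c : Char) : Bool := c == 'i' || c == '0'

-- the outer while-loop of B: position i over the remaining characters
def altGo : List Char → Int → List (String × Int)
  | [], _ => []
  | c :: rest, i =>
    if h : altSep c then altGo rest (i + 1)
    else
      -- inner while-loop: j runs to the end of the maximal non-separator run
      let run := (c :: rest).takeWhile (fun d => !altSep d)
      let rest' := (c :: rest).dropWhile (fun d => !altSep d)
      if rest'.isEmpty then []
      else (String.ofList run, i) :: altGo rest' (i + run.length)
  termination_by cs _ => cs.length
  decreasing_by
    · simp only [List.length_cons]; omega
    · have heq : List.dropWhile (fun d => !altSep d) (c :: rest)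
          = List.dropWhile (fun d => !altSep d) rest := by
        simp [h]
      rw [heq]
      have := List.length_dropWhile_le (p := fun d => !altSep d) (l := rest)
      simp only [List.length_cons]
      omega

def split_motifs_alt (labels : String) : List (String × Int) :=
  altGo labels.toList 0

-- ===== PRECONDITION & SPEC =====
def Spec_split_motifs (labels : String) (out : List (String × Int)) : Prop := out = split_motifs_alt labels
instance (labels : String) (out : List (String × Int)) : Decidable (Spec_split_motifs labels out) := by unfold Spec_split_motifs; infer_instance

-- ===== CLAIM (what is proved, stated in full; the proofs are below) =====
def Claim_equal_split_motifs : Prop := ∀ (labels : String), Dom_split_motifs labels → Spec_split_motifs labels (split_motifs labels)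

-- ===== LEMMAS AND PROOFS =====

-- A's separator test (a Prop) and B's (a Bool) agree
lemma sep_iff (c : Char) : (c = 'i' ∨ c = '0') ↔ altSep c = true := by
  simp [altSep]

-- how B behaves on a pending (non-empty, separator-free) run `pref` followed by `cs`
lemma altGo_pref (pref cs : List Char) (m : Int) (hne : pref ≠ [])
    (hns : ∀ c ∈ pref, altSep c = false) :
    altGo (pref ++ cs) m =
      if (cs.dropWhile (fun d => !altSep d)).isEmpty then []
      else (String.ofList (pref ++ cs.takeWhile (fun d => !altSep d)), m)
           :: altGo (cs.dropWhile (fun d => !altSep d))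
                (m + (pref ++ cs.takeWhile (fun d => !altSep d)).length) := by
  obtain ⟨d, pref', rfl⟩ : ∃ d pref', pref = d :: pref' := by
    cases pref with
    | nil => exact absurd rfl hne
    | cons d pref' => exact ⟨d, pref', rfl⟩
  have hpos : ∀ c ∈ (d :: pref'), (fun d => !altSep d) c = true := by
    intro c hc; simp [hns c hc]
  have hd : altSep d = false := hns d (by simp)
  rw [show (d :: pref') ++ cs = d :: (pref' ++ cs) by simp]
  rw [altGo]
  simp only [hd, Bool.false_eq_true, reduceDIte]
  rw [show d :: (pref' ++ cs) = (d :: pref') ++ cs by simp]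
  rw [List.takeWhile_append_of_pos hpos, List.dropWhile_append_of_pos hpos]

-- the slice A emits is exactly the pending run
lemma slice_eq_run (labels : String) (m : Nat) (pref rest : List Char)
    (hdrop : labels.toList.drop m = pref ++ rest) :
    PySem.Str.slice labels (some (m : Int)) (some ((m + pref.length : Nat) : Int))
      = String.ofList pref := by
  apply String.toList_inj.mp
  rw [PySem.Str.toList_slice, PySem.Chars.slice_eq_listSlice, PySem.List.slice_natCast, hdrop,
    String.toList_ofList, show (m + pref.length) - m = pref.length by omega]
  exact List.take_left' rfl

-- the two loops agree, for both shapes of A's state: msi = -1 (outside a motif) and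
-- msi = m ≥ 0 (inside a motif whose characters so far are `pref`)
lemma both (labels : String) (cs : List Char) :
    (∀ (p : Nat) (acc : List (String × Int)), labels.toList.drop p = cs →
       ((PySem.List.enumerate cs (p : Int)).foldl (aStep labels) (acc, -1)).1
         = acc ++ altGo cs (p : Int))
    ∧
    (∀ (m : Nat) (pref : List Char) (acc : List (String × Int)), pref ≠ [] →
       (∀ c ∈ pref, altSep c = false) →
       labels.toList.drop m = pref ++ cs →
       ((PySem.List.enumerate cs ((m + pref.length : Nat) : Int)).foldl (aStep labels) (acc, (m : Int))).1
         = acc ++ altGo (pref ++ cs) (m : Int)) := by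
  induction cs with
  | nil =>
    constructor
    · intro p acc _
      simp [PySem.List.enumerate_nil, altGo]
    · intro m pref acc hne hns _
      rw [altGo_pref pref [] (m : Int) hne hns]
      simp [PySem.List.enumerate_nil]
  | cons c cs ih =>
    constructor
    · intro p acc hdrop
      by_cases hc : altSep c = true
      · -- separator while not in a motif: state unchanged
        rw [PySem.List.enumerate_cons]
        simp only [List.foldl_cons]
        have hstep : aStep labels (acc, -1) ((p : Int), c) = (acc, -1) := by
          simp [aStep, (sep_iff c).mpr hc]
        rw [hstep]
        have hdrop' : labels.toList.drop (p + 1) = cs := by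
          have h1 := congrArg (List.drop 1) hdrop
          rw [List.drop_drop] at h1
          simpa using h1
        have hIH := ih.1 (p + 1) acc hdrop'
        have halt : altGo (c :: cs) (p : Int) = altGo cs ((p : Int) + 1) := by
          rw [altGo]; simp [hc]
        rw [halt]
        push_cast at hIH
        exact hIH
      · -- non-separator: a motif starts at p
        rw [PySem.List.enumerate_cons]
        simp only [List.foldl_cons]
        have hstep : aStep labels (acc, -1) ((p : Int), c) = (acc, (p : Int)) := by
          simp [aStep, sep_iff, hc]
        rw [hstep]
        have := ih.2 p [c] acc (by simp) (by simp [hc]) (by simpa using hdrop)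
        simpa using this
    · intro m pref acc hne hns hdrop
      by_cases hc : altSep c = true
      · -- separator ends the pending run: A emits the slice, B emits the run
        rw [PySem.List.enumerate_cons]
        simp only [List.foldl_cons]
        have hstep : aStep labels (acc, (m : Int)) (((m + pref.length : Nat) : Int), c)
            = (acc ++ [(PySem.Str.slice labels (some (m : Int)) (some ((m + pref.length : Nat) : Int)), (m : Int))], -1) := by
          simp [aStep, (sep_iff c).mpr hc]
        rw [hstep]
        have hdrop' : labels.toList.drop (m + pref.length + 1) = cs := by
          have h1 := congrArg (List.drop (pref.length + 1)) hdrop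
          rw [List.drop_drop] at h1
          rw [show pref ++ c :: cs = (pref ++ [c]) ++ cs by simp] at h1
          rw [show List.drop (pref.length + 1) ((pref ++ [c]) ++ cs) = cs by
            rw [show pref.length + 1 = (pref ++ [c]).length by simp, List.drop_left]] at h1
          rw [show m + pref.length + 1 = m + (pref.length + 1) by omega]
          exact h1
        have hIH := ih.1 (m + pref.length + 1) (acc ++ [(PySem.Str.slice labels (some (m : Int)) (some ((m + pref.length : Nat) : Int)), (m : Int))]) hdrop'
        rw [show ((m + pref.length : Nat) : Int) + 1 = ((m + pref.length + 1 : Nat) : Int) by push_cast; ring]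
        rw [hIH]
        rw [altGo_pref pref (c :: cs) (m : Int) hne hns]
        have htw : (c :: cs).takeWhile (fun d => !altSep d) = [] := by simp [hc]
        have hdw : (c :: cs).dropWhile (fun d => !altSep d) = c :: cs := by simp [hc]
        rw [htw, hdw]
        simp only [List.isEmpty_cons, List.append_nil]
        rw [slice_eq_run labels m pref (c :: cs) hdrop]
        have halt : altGo (c :: cs) ((m : Int) + pref.length) = altGo cs ((m : Int) + pref.length + 1) := by
          rw [altGo]; simp [hc]
        rw [halt]
        rw [show (m : Int) + (pref.length : Nat) + 1 = ((m + pref.length + 1 : Nat) : Int) by push_cast; ring]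
        simp
      · -- non-separator extends the pending run
        rw [PySem.List.enumerate_cons]
        simp only [List.foldl_cons]
        have hstep : aStep labels (acc, (m : Int)) (((m + pref.length : Nat) : Int), c)
            = (acc, (m : Int)) := by
          simp [aStep, sep_iff, hc]
        rw [hstep]
        have hns' : ∀ d ∈ pref ++ [c], altSep d = false := by
          intro d hd
          rcases List.mem_append.mp hd with h | h
          · exact hns d h
          · simp at h; subst h; simpa using hc
        have hdrop' : labels.toList.drop m = (pref ++ [c]) ++ cs := by
          rw [hdrop]; simp
        have hIH := ih.2 m (pref ++ [c]) acc (by simp) hns' hdrop'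
        rw [show ((m + pref.length : Nat) : Int) + 1 = ((m + (pref ++ [c]).length : Nat) : Int) by
          push_cast [List.length_append, List.length_cons, List.length_nil]; ring]
        rw [hIH]
        simp

-- ===== VERDICT (by name: the statement is the Claim_ definition above) =====
theorem split_motifs_spec : Claim_equal_split_motifs := by
  intro labels _
  unfold Spec_split_motifs split_motifs split_motifs_alt
  have h := (both labels labels.toList).1 0 [] (by simp)
  simpa using h
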